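-- pv_equiv track=rewrite | github.com/NarekID/Basic-IT-Center---Python | Homeworks 3/ex201-210.py | ex208
-- ===== SOURCE A (Python) =====
-- def ex208(n):
--     temp = -1
--     while n > 0:
--         a = n % 10
--         if temp is -1:
--             temp = a
--         if temp != a:
--             return False
--         n //= 10
--     return True
-- ===== SOURCE B (Python) =====
-- def ex208(n):
--     # n <= 0: the loop body never runs, vacuously all digits are "equal".
--     if n <= 0:
--         return True
--     # Build the repunit r = 11...1 with as many ones as n has digits,
--     # then test divisibility: n's digits are all equal iff n is a
--     # multiple of that repunit (the quotient is the common digit).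
--     r = 0
--     m = n
--     while m > 0:
--         r = 10 * r + 1
--         m //= 10
--     return n % r == 0
-- ===== Notes on version B (the rewrite author's own statement) =====
-- stated objective: alternative
-- what changed: Replaces the digit-by-digit compare-against-first-digit scan with a single divisibility test: B builds the repunit 11...1 with as many ones as n has digits and returns n % repunit == 0 (a repdigit is exactly a digit times a repunit).
import Mathlib
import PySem

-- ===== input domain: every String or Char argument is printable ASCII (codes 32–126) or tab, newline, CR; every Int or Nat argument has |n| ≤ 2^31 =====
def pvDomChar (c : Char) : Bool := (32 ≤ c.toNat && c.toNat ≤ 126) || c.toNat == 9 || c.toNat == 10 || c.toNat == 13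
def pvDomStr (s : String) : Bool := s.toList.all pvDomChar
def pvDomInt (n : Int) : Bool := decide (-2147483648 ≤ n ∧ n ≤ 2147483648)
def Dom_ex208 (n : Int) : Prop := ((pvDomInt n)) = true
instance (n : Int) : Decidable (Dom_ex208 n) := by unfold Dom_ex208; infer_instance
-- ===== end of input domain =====

-- B checks "all digits of n are equal" by one divisibility test against the repunit with
-- n's digit count, instead of A's digit-by-digit comparison against the first digit.

-- ===== PORT A =====
-- the while loop of A; `temp is -1` is ported as `temp == -1` (exact in CPython, -1 is interned)
def ex208Loop (n temp : Int) : Bool :=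
  if _h : 0 < n then
    let a := PySem.Int.mod n 10
    let temp1 := if temp == -1 then a else temp
    if temp1 != a then false
    else ex208Loop (PySem.Int.floordiv n 10) temp1
  else true
termination_by n.toNat
decreasing_by
  rw [PySem.Int.floordiv_eq_ediv_of_pos (by norm_num : (0:Int) < 10)]
  omega

def ex208 (n : Int) : Bool := ex208Loop n (-1)

-- ===== PORT B =====
-- Source B's while loop building r = 10*r + 1 for each digit of m
def repunitLoop (m r : Int) : Int :=
  if _h : 0 < m then repunitLoop (PySem.Int.floordiv m 10) (10 * r + 1) else r
termination_by m.toNat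
decreasing_by
  rw [PySem.Int.floordiv_eq_ediv_of_pos (by norm_num : (0:Int) < 10)]
  omega

def ex208_alt (n : Int) : Bool :=
  if n ≤ 0 then true
  else decide (PySem.Int.mod n (repunitLoop n 0) = 0)

-- ===== PRECONDITION & SPEC =====
def Spec_ex208 (n : Int) (out : Bool) : Prop := out = ex208_alt n
instance (n : Int) (out : Bool) : Decidable (Spec_ex208 n out) := by unfold Spec_ex208; infer_instance

-- ===== CLAIM (what is proved, stated in full; the proofs are below) =====
def Claim_equal_ex208 : Prop := ∀ (n : Int), Dom_ex208 n → Spec_ex208 n (ex208 n)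

-- ===== LEMMAS AND PROOFS =====

-- A's loop over the little-endian digit list
def loopD : List Nat → Int → Bool
  | [], _ => true
  | a :: as, t =>
      let t1 := if t == -1 then (a : Int) else t
      if t1 != (a : Int) then false else loopD as t1

-- B's loop over the digit count
def repInt : Nat → Int → Int
  | 0, r => r
  | L + 1, r => repInt L (10 * r + 1)

-- the repunit 11...1 with L ones
def RNat : Nat → Nat
  | 0 => 0
  | L + 1 => 10 * RNat L + 1

theorem RNat_pow (L : Nat) : 9 * RNat L + 1 = 10 ^ L := by
  induction L with
  | zero => simp [RNat]
  | succ L ih => simp [RNat, pow_succ]; omega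

theorem RNat_pos (L : Nat) (h : 0 < L) : 0 < RNat L := by
  cases L with
  | zero => omega
  | succ L => simp only [RNat]; omega

theorem ofDigits_replicate (L d : Nat) :
    Nat.ofDigits 10 (List.replicate L d) = d * RNat L := by
  induction L with
  | zero => simp [RNat]
  | succ L ih => simp [List.replicate_succ, Nat.ofDigits_cons, ih, RNat]; ring

theorem ex208Loop_digits (m : Nat) (t : Int) :
    ex208Loop (m : Int) t = loopD (Nat.digits 10 m) t := by
  induction m using Nat.strong_induction_on generalizing t with
  | _ m ih =>
    by_cases hm : 0 < m
    · have h10 : (0 : Int) < (m : Int) := by exact_mod_cast hm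
      have ha : PySem.Int.mod (m : Int) 10 = ((m % 10 : Nat) : Int) := by
        exact_mod_cast PySem.Int.mod_natCast m 10
      have hf : PySem.Int.floordiv (m : Int) 10 = ((m / 10 : Nat) : Int) := by
        exact_mod_cast PySem.Int.floordiv_natCast m 10
      rw [ex208Loop, dif_pos h10, Nat.digits_def' (by norm_num : 1 < 10) hm]
      simp only [loopD, ha, hf]
      rw [ih (m / 10) (Nat.div_lt_self hm (by norm_num))]
    · have hm0 : m = 0 := by omega
      subst hm0
      rw [ex208Loop]
      simp [loopD]

theorem repunitLoop_digits (m : Nat) (r : Int) :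
    repunitLoop (m : Int) r = repInt (Nat.digits 10 m).length r := by
  induction m using Nat.strong_induction_on generalizing r with
  | _ m ih =>
    by_cases hm : 0 < m
    · have h10 : (0 : Int) < (m : Int) := by exact_mod_cast hm
      have hf : PySem.Int.floordiv (m : Int) 10 = ((m / 10 : Nat) : Int) := by
        exact_mod_cast PySem.Int.floordiv_natCast m 10
      rw [repunitLoop, dif_pos h10, Nat.digits_def' (by norm_num : 1 < 10) hm, hf]
      simp only [List.length_cons, repInt]
      exact ih (m / 10) (Nat.div_lt_self hm (by norm_num)) _
    · have hm0 : m = 0 := by omega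
      subst hm0
      rw [repunitLoop]
      simp [repInt]

theorem repInt_eq (L : Nat) (r : Int) : repInt L r = r * 10 ^ L + (RNat L : Int) := by
  induction L generalizing r with
  | zero => simp [repInt, RNat]
  | succ L ih =>
    have h9 : (9 : Int) * (RNat L : Int) + 1 = 10 ^ L := by
      exact_mod_cast RNat_pow L
    simp only [repInt, ih, RNat, pow_succ]
    push_cast
    ring_nf
    ring_nf at h9
    linarith [h9]

theorem loopD_all (l : List Nat) (d : Nat) :
    loopD l (d : Int) = l.all (fun a => decide (a = d)) := by
  induction l with
  | nil => simp [loopD]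
  | cons a as ih =>
    simp only [loopD, List.all_cons]
    have hne : ((d : Int) == -1) = false := by
      simp only [beq_eq_false_iff_ne]; omega
    simp only [hne, Bool.false_eq_true, if_false]
    by_cases hda : a = d
    · subst hda; simp [ih]
    · have : ((d : Int) != (a : Int)) = true := by
        simp only [bne_iff_ne, ne_eq]
        intro h; exact hda (by exact_mod_cast h.symm)
      rw [this]
      simp [hda]

-- the heart: for m > 0 with digits d :: ds, all remaining digits equal d iff the repunit divides m
theorem alleq_iff_mod (m d : Nat) (ds : List Nat) (hm : 0 < m)
    (hd : Nat.digits 10 m = d :: ds) :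
    ((∀ a ∈ ds, a = d) ↔ m % RNat (ds.length + 1) = 0) := by
  set L := ds.length + 1 with hL
  have hRpos : 0 < RNat L := RNat_pos L (by omega)
  constructor
  · intro hall
    have hrep : Nat.digits 10 m = List.replicate L d := by
      rw [hd, hL, List.replicate_succ]
      congr 1
      exact List.eq_replicate_of_mem hall
    have : m = Nat.ofDigits 10 (Nat.digits 10 m) := (Nat.ofDigits_digits 10 m).symm
    rw [hrep, ofDigits_replicate] at this
    rw [this]
    exact Nat.mul_mod_left d _
  · intro hmod
    have hdvd : RNat L ∣ m := Nat.dvd_of_mod_eq_zero hmod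
    obtain ⟨k, hk⟩ := hdvd
    have hk1 : 1 ≤ k := by
      rcases Nat.eq_zero_or_pos k with h | h
      · subst h; omega
      · exact h
    have hlen : (Nat.digits 10 m).length ≤ L := by rw [hd]; simp [hL]
    have hmlt : m < 10 ^ L := (Nat.digits_length_le_iff (by norm_num) m).mp hlen
    have hk9 : k ≤ 9 := by
      have hpow : 9 * RNat L + 1 = 10 ^ L := RNat_pow L
      by_contra hgt
      have h10k : 10 ≤ k := by omega
      have h2 : RNat L * 10 ≤ m := by
        rw [hk]; exact Nat.mul_le_mul_left _ h10k
      omega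
    have hdig : Nat.digits 10 m = List.replicate L k := by
      have hof : Nat.ofDigits 10 (List.replicate L k) = m := by
        rw [ofDigits_replicate, hk, Nat.mul_comm]
      rw [← hof]
      apply Nat.digits_ofDigits 10 (by norm_num)
      · intro x hx
        have := List.eq_of_mem_replicate hx
        omega
      · intro h
        rw [List.getLast_eq_getElem]
        simp only [List.getElem_replicate]
        omega
    rw [hd, hL, List.replicate_succ] at hdig
    injection hdig with h1 h2
    intro a ha
    rw [h2] at ha
    rw [h1]
    exact List.eq_of_mem_replicate ha

theorem main_pos (m : Nat) (hm : 0 < m) :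
    loopD (Nat.digits 10 m) (-1) =
      decide (m % RNat (Nat.digits 10 m).length = 0) := by
  cases hdig : Nat.digits 10 m with
  | nil =>
    exfalso
    have := Nat.digits_ne_nil_iff_ne_zero (b := 10) (n := m)
    simp [hdig] at this
    omega
  | cons d ds =>
    simp only [loopD]
    have h1 : ((-1 : Int) == -1) = true := by decide
    rw [h1]
    simp only [if_true, bne_self_eq_false, Bool.false_eq_true, if_false]
    rw [loopD_all, List.length_cons, Bool.eq_iff_iff]
    simp only [List.all_eq_true, decide_eq_true_eq]
    exact alleq_iff_mod m d ds hm hdig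

-- ===== VERDICT (by name: the statement is the Claim_ definition above) =====
theorem ex208_spec : Claim_equal_ex208 := by
  intro n _
  unfold Spec_ex208 ex208 ex208_alt
  by_cases hn : n ≤ 0
  · rw [ex208Loop]
    simp [hn, not_lt.mpr hn]
  · have hn' : 0 < n := by omega
    have hnn : n = ((n.toNat : Nat) : Int) := by omega
    set m := n.toNat with hm
    have hmpos : 0 < m := by omega
    rw [if_neg (by omega)]
    rw [hnn, ex208Loop_digits, repunitLoop_digits, repInt_eq]
    simp only [zero_mul, zero_add]
    rw [PySem.Int.mod_natCast, main_pos m hmpos, decide_eq_decide]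
    exact_mod_cast Iff.rfl
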